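-- pv_equiv track=rewrite | github.com/LongPML/CS112.L21.KHCL | Project_Unit_Test/DBT.py | DBT_Solve1
-- ===== SOURCE A (Python) =====
-- def DBT_Solve1(n):
--         if 1 == n:
--                 return 1
--         elif 10 > n:
--                 return 2
--         else:
--                 n_len = len(str(n))
--                 start = 10
--                 end = 90
--                 Cost = 1
--
--                 for i in range(2, n_len):
--                         Cost += i*((end - start)//10 +1)
--                         start *= 10
--                         end = end * 10 + 90
--                 Cost += ((n//10 - 10**(n_len - 2)) + 1)*n_len
--                 if 0 == n % 10:
--                         return Cost
--                 else: return Cost + n_len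
-- ===== SOURCE B (Python) =====
-- def DBT_Solve1(n):
--     if n == 1:
--         return 1
--     if n < 10:
--         return 2
--     L = len(str(n))
--     p = 10 ** (L - 2)
--     # closed form for the cost of all full digit-length blocks of multiples of ten
--     s = (L - 1) * p - (p - 1) // 9 - 1
--     total = s + (n // 10 - p + 1) * L + 1
--     return total if n % 10 == 0 else total + L
-- ===== Notes on version B (the rewrite author's own statement) =====
-- stated objective: simpler
-- what changed: A accumulates the per-digit-length block costs in a loop over digit lengths with running start/end markers and a floor division per step; B replaces that loop by a loop-free closed-form expression built from a repunit, so B is straight-line arithmetic.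
import Mathlib
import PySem

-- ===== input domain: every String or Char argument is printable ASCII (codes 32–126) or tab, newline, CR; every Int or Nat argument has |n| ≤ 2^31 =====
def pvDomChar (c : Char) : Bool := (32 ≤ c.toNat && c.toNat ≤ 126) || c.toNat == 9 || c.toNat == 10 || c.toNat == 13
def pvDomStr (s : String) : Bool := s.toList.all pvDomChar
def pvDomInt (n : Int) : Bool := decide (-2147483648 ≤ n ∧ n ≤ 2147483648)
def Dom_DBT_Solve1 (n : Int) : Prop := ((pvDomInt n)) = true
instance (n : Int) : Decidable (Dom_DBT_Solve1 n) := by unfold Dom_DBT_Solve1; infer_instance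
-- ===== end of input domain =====

-- B replaces A's per-digit-length accumulation loop by a closed-form repunit formula (simpler, loop-free).

-- ===== PORT A =====
def DBT_Solve1 (n : Int) : Int :=
  if 1 = n then 1
  else if 10 > n then 2
  else
    let nLen : Nat := (PySem.Int.toStr n).toList.length   -- len(str(n))
    let st :=
      (PySem.List.pyRange 2 (nLen : Int) 1).foldl
        (fun (st : Int × Int × Int) (i : Int) =>
          (st.1 + i * (PySem.Int.floordiv (st.2.2 - st.2.1) 10 + 1),
           st.2.1 * 10, st.2.2 * 10 + 90))
        (1, 10, 90)
    let cost := st.1 + (PySem.Int.floordiv n 10 - 10 ^ (nLen - 2) + 1) * (nLen : Int)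
    if PySem.Int.mod n 10 = 0 then cost else cost + (nLen : Int)

-- ===== PORT B =====
def DBT_Solve1_alt (n : Int) : Int :=
  if n = 1 then 1
  else if n < 10 then 2
  else
    let L : Nat := (PySem.Int.toStr n).toList.length      -- len(str(n))
    let p : Int := 10 ^ (L - 2)
    let s : Int := ((L - 1 : Nat) : Int) * p - PySem.Int.floordiv (p - 1) 9 - 1
    let total := s + (PySem.Int.floordiv n 10 - p + 1) * (L : Int) + 1
    if PySem.Int.mod n 10 = 0 then total else total + (L : Int)

-- ===== PRECONDITION & SPEC =====
def Spec_DBT_Solve1 (n : Int) (out : Int) : Prop := out = DBT_Solve1_alt n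
instance (n : Int) (out : Int) : Decidable (Spec_DBT_Solve1 n out) := by unfold Spec_DBT_Solve1; infer_instance

-- ===== CLAIM (what is proved, stated in full; the proofs are below) =====
def Claim_equal_DBT_Solve1 : Prop := ∀ (n : Int), Dom_DBT_Solve1 n → Spec_DBT_Solve1 n (DBT_Solve1 n)

-- ===== LEMMAS AND PROOFS =====

/-- repunit: `pvRep k = (10^k - 1)/9`, defined recursively. -/
def pvRep : Nat → Int
  | 0 => 0
  | k + 1 => 10 * pvRep k + 1

theorem nine_mul_pvRep (k : Nat) : 9 * pvRep k = 10 ^ k - 1 := by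
  induction k with
  | zero => simp [pvRep]
  | succ k ih => simp only [pvRep, pow_succ]; linarith

theorem floordiv_repunit (k : Nat) :
    PySem.Int.floordiv ((10 : Int) ^ k - 1) 9 = pvRep k := by
  have h := nine_mul_pvRep k
  rw [← h, PySem.Int.floordiv, Int.mul_fdiv_cancel_left _ (by norm_num)]

theorem floordiv_ten_mul (q : Int) : PySem.Int.floordiv (10 * q) 10 = q := by
  rw [PySem.Int.floordiv, Int.mul_fdiv_cancel_left _ (by norm_num)]

/-- A's loop invariant: after iterating `i = 2 .. m`, the state is
    `(m*10^(m-1) - pvRep (m-1), 10^m, 10^(m+1) - 10)`. -/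
theorem loop_closed_form : ∀ m : Nat, 1 ≤ m →
    (PySem.List.pyRange 2 ((m : Int) + 1) 1).foldl
        (fun (st : Int × Int × Int) (i : Int) =>
          (st.1 + i * (PySem.Int.floordiv (st.2.2 - st.2.1) 10 + 1),
           st.2.1 * 10, st.2.2 * 10 + 90))
        (1, 10, 90)
      = ((m : Int) * 10 ^ (m - 1) - pvRep (m - 1), 10 ^ m, 10 ^ (m + 1) - 10) := by
  intro m hm
  induction m with
  | zero => omega
  | succ m ih =>
    rcases Nat.eq_or_lt_of_le hm with h1 | h1
    · -- m + 1 = 1 : empty range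
      have : m = 0 := by omega
      subst this
      rw [PySem.List.pyRange_one_eq_nil (by norm_num)]
      decide
    · -- m ≥ 1
      obtain ⟨k, hk⟩ : ∃ k, m = k + 1 := ⟨m - 1, by omega⟩
      subst hk
      rw [show (((k + 1 + 1 : Nat) : Int) + 1) = (((k + 1 : Nat) : Int) + 1) + 1 by push_cast; ring,
          PySem.List.pyRange_one_succ_right (by push_cast; omega),
          List.foldl_append, ih (by omega)]
      simp only [List.foldl, Nat.add_sub_cancel]
      have hdiv : PySem.Int.floordiv ((10:Int) ^ (k + 1 + 1) - 10 - 10 ^ (k + 1)) 10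
          = 10 ^ (k + 1) - 10 ^ k - 1 := by
        rw [show (10:Int) ^ (k + 1 + 1) - 10 - 10 ^ (k + 1) = 10 * (10 ^ (k + 1) - 10 ^ k - 1) by ring,
            floordiv_ten_mul]
      rw [hdiv]
      have h9 : 9 * pvRep k = 10 ^ k - 1 := nine_mul_pvRep k
      have hrep : pvRep (k + 1) = 10 * pvRep k + 1 := rfl
      refine Prod.ext ?_ (Prod.ext ?_ ?_)
      · show ((k:Int) + 1) * 10 ^ k - pvRep k + (((k + 1 : Nat) : Int) + 1) * (10 ^ (k + 1) - 10 ^ k - 1 + 1)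
            = ((k + 1 + 1 : Nat) : Int) * 10 ^ (k + 1) - pvRep (k + 1)
        rw [hrep]
        push_cast
        have h10 : (10:Int) ^ (k + 1) = 10 * 10 ^ k := by ring
        rw [h10]
        linarith
      · show (10:Int) ^ (k + 1) * 10 = 10 ^ (k + 1 + 1); ring
      · show ((10:Int) ^ (k + 1 + 1) - 10) * 10 + 90 = 10 ^ (k + 1 + 1 + 1) - 10; ring

/-- fuel-based digit printer never shrinks the accumulator. -/
theorem toDigitsCore_length_ge (b : Nat) :
    ∀ (f n : Nat) (l : List Char), l.length ≤ (Nat.toDigitsCore b f n l).length := by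
  intro f
  induction f with
  | zero => intro n l; simp [Nat.toDigitsCore]
  | succ f ih =>
    intro n l
    simp only [Nat.toDigitsCore]
    split
    · simp
    · exact le_trans (by simp) (ih (n / b) (Nat.digitChar (n % b) :: l))

theorem toDigits_length_ge_two {n : Nat} (hn : 10 ≤ n) :
    2 ≤ (Nat.toDigits 10 n).length := by
  obtain ⟨k, hk⟩ : ∃ k, n = k + 1 := ⟨n - 1, by omega⟩
  unfold Nat.toDigits
  rw [hk]
  simp only [Nat.toDigitsCore]
  have h1 : ¬ (k + 1) / 10 = 0 := by omega
  rw [if_neg h1]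
  obtain ⟨j, hj⟩ : ∃ j, k = j + 1 := ⟨k - 1, by omega⟩
  subst hj
  rw [Nat.toDigitsCore]
  split
  · simp
  · split
    · simp
    · refine le_trans ?_ (toDigitsCore_length_ge 10 j _ _)
      simp

theorem toStr_length_ge_two {n : Int} (hn : 10 ≤ n) :
    2 ≤ (PySem.Int.toStr n).toList.length := by
  rw [PySem.Int.toList_toStr, PySem.Int.toChars, if_neg (by omega)]
  exact toDigits_length_ge_two (by omega)

-- ===== VERDICT (by name: the statement is the Claim_ definition above) =====
theorem DBT_Solve1_spec : Claim_equal_DBT_Solve1 := by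
  intro n _
  unfold Spec_DBT_Solve1 DBT_Solve1 DBT_Solve1_alt
  by_cases h1 : n = 1
  · simp [h1]
  · rw [if_neg (by omega), if_neg h1]
    by_cases h2 : n < 10
    · rw [if_pos (by omega), if_pos h2]
    · rw [if_neg (by omega), if_neg h2]
      have hn : (10 : Int) ≤ n := by omega
      have hL2 : 2 ≤ (PySem.Int.toStr n).toList.length := toStr_length_ge_two hn
      obtain ⟨m, hm⟩ : ∃ m, (PySem.Int.toStr n).toList.length = m + 1 :=
        ⟨(PySem.Int.toStr n).toList.length - 1, by omega⟩
      have hm1 : 1 ≤ m := by omega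
      simp only [hm]
      rw [show (((m + 1 : Nat) : Int)) = (m : Int) + 1 by push_cast; ring,
          loop_closed_form m hm1]
      simp only [Nat.add_sub_cancel, show m + 1 - 2 = m - 1 from by omega]
      rw [← floordiv_repunit (m - 1)]
      split <;> ring
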